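-- pv_equiv track=rewrite | github.com/Peoplecanfly1/algo_and_structures_python | Lesson_7/3.py | parts
-- ===== SOURCE A (Python) =====
-- def parts(array):
--     left = []
--     right = []
--     for i in range(len(array)):
--         for j in range(len(array)):
--             if array[i] > array[j]:
--                 left.append(array[j])
--             if array[i] < array[j]:
--                 right.append(array[j])
--             if array[i] == array[j] and i > j:
--                 left.append(array[j])
--             if array[i] == array[j] and i < j:
--                 right.append(array[j])
--         if len(left) == len(right):
--             return array[i]
--         left.clear()
--         right.clear()
-- ===== SOURCE B (Python) =====
-- def parts(array):
--     # O(n log n): prefix-sum 'less-than' counts over sorted distinct values,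
--     # then one pass tracking how many equal elements were seen before each index.
--     n = len(array)
--     counts = {}
--     for v in array:
--         counts[v] = counts.get(v, 0) + 1
--     less = {}
--     acc = 0
--     for v in sorted(counts):
--         less[v] = acc
--         acc += counts[v]
--     seen = {}
--     for v in array:
--         b = seen.get(v, 0)
--         if 2 * (less[v] + b) == n - 1:
--             return v
--         seen[v] = b + 1
--     return None
-- ===== Notes on version B (the rewrite author's own statement) =====
-- stated objective: faster
-- what changed: Replaces A's O(n^2) double scan (rebuilding left/right lists for every index) by counting: a value-count dict, prefix sums over the sorted distinct values giving each value's less-than count, and one linear pass tracking equal-elements-seen, returning the first element with 2*(less+seen_equal) == n-1.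
import Mathlib
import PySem

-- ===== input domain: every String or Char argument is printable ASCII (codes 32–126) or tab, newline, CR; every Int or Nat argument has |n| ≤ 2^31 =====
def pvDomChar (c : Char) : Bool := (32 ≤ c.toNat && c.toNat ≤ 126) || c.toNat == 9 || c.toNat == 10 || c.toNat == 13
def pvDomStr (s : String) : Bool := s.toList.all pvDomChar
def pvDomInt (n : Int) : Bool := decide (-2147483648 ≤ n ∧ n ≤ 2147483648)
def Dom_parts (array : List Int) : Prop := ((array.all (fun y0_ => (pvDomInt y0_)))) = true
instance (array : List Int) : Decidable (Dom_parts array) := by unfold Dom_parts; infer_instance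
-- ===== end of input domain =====

-- B replaces A's quadratic double scan by sorted prefix-sums of value counts plus one
-- linear pass (objective: faster, O(n log n) vs O(n^2)); return value is identical.

-- ===== PORT A =====
-- inner 'for j in range(len(array))' loop, building the left/right lists afresh for one i
def partsInner (array : List Int) (i : Int) : List Int × List Int :=
  (PySem.List.pyRange 0 (array.length : Int) 1).foldl
    (fun (lr : List Int × List Int) j =>
      let ai := PySem.List.pyGetD array i 0   -- i, j always in range here
      let aj := PySem.List.pyGetD array j 0
      let l1 := if ai > aj then lr.1 ++ [aj] else lr.1
      let r1 := if ai < aj then lr.2 ++ [aj] else lr.2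
      let l2 := if ai = aj ∧ i > j then l1 ++ [aj] else l1
      let r2 := if ai = aj ∧ i < j then r1 ++ [aj] else r1
      (l2, r2)) ([], [])

-- outer 'for i in range(len(array))' loop with early return ('left.clear()' = fresh lists)
def partsLoop (array : List Int) : List Int → Option Int
  | [] => none
  | i :: rest =>
    let lr := partsInner array i
    if lr.1.length = lr.2.length then some (PySem.List.pyGetD array i 0)
    else partsLoop array rest

def parts (array : List Int) : Option Int :=
  partsLoop array (PySem.List.pyRange 0 (array.length : Int) 1)

-- ===== PORT B =====
-- final pass: 'for v in array: b = seen.get(v,0); if 2*(less[v]+b)==n-1: return v; seen[v]=b+1'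
-- ('less[v]' ported as getD: v is an element of array, hence always a key of less)
def altScan (n : Int) (less : PySem.Dict Int Int) : PySem.Dict Int Int → List Int → Option Int
  | _, [] => none
  | seen, v :: rest =>
    let b := seen.getD v 0
    if 2 * (less.getD v 0 + b) = n - 1 then some v
    else altScan n less (seen.insert v (b + 1)) rest

def parts_alt (array : List Int) : Option Int :=
  let n : Int := array.length
  let counts := array.foldl (fun d v => d.insert v (d.getD v 0 + 1)) PySem.Dict.empty
  let lessAcc := (PySem.List.sorted counts.keys (fun x => x) false).foldl
      (fun (p : PySem.Dict Int Int × Int) v => (p.1.insert v p.2, p.2 + counts.getD v 0))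
      (PySem.Dict.empty, 0)
  altScan n lessAcc.1 PySem.Dict.empty array

-- ===== PRECONDITION & SPEC =====
def Spec_parts (array : List Int) (out : Option Int) : Prop := out = parts_alt array
instance (array : List Int) (out : Option Int) : Decidable (Spec_parts array out) := by unfold Spec_parts; infer_instance

-- ===== CLAIM (what is proved, stated in full; the proofs are below) =====
def Claim_equal_parts : Prop := ∀ (array : List Int), Dom_parts array → Spec_parts array (parts array)

-- ===== LEMMAS AND PROOFS =====

-- the common characterisation: index i is a hit iff 2*(#{x < a[i]} + #{equal among a[0..i)}) = n-1
def goodB (a : List Int) (i : Nat) : Bool :=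
  decide (2 * ((a.countP (fun x => decide (x < a.getD i 0)) : Int) + ((a.take i).count (a.getD i 0) : Int))
            = (a.length : Int) - 1)

def specFind (a : List Int) : Option Int :=
  ((List.range a.length).find? (goodB a)).map (fun i => a.getD i 0)

-- (range n).map getD = the list itself
theorem map_getD_range (a : List Int) : (List.range a.length).map (fun j => a.getD j 0) = a := by
  apply List.ext_getElem <;> simp [List.getD_eq_getElem?_getD]
  intro i h1 h2
  simp [List.getElem?_eq_getElem h2]

theorem map_getD_range_take (a : List Int) (i : Nat) (h : i ≤ a.length) :
    (List.range i).map (fun j => a.getD j 0) = a.take i := by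
  apply List.ext_getElem <;> simp [List.getD_eq_getElem?_getD, Nat.min_eq_left h]
  intro k h1
  simp [List.getElem?_eq_getElem (Nat.lt_of_lt_of_le h1 h)]

theorem map_getD_range_drop (a : List Int) (i : Nat) :
    (List.range (a.length - (i+1))).map (fun t => a.getD (i+1+t) 0) = a.drop (i+1) := by
  apply List.ext_getElem <;> simp [List.getD_eq_getElem?_getD]
  intro k h1
  have : i + 1 + k < a.length := by omega
  simp [List.getElem?_eq_getElem this]

-- length of a fold that appends under two (sequential) conditions
theorem len_foldl_if_if {α β : Type} (p q : α → Prop) [DecidablePred p] [DecidablePred q]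
    (f g : α → β) (l : List α) (acc : List β) :
    (l.foldl (fun ac x =>
        if q x then (if p x then ac ++ [f x] else ac) ++ [g x]
        else (if p x then ac ++ [f x] else ac)) acc).length
      = acc.length + l.countP (fun x => decide (p x)) + l.countP (fun x => decide (q x)) := by
  induction l generalizing acc with
  | nil => simp
  | cons x t ih =>
    simp only [List.foldl_cons, ih, List.countP_cons]
    split_ifs <;> simp_all <;> omega

-- three-way split of the length by comparison with v
theorem length_three_way (a : List Int) (v : Int) :
    a.length = a.countP (fun x => decide (x < v)) + a.count v + a.countP (fun x => decide (v < x)) := by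
  induction a with
  | nil => simp
  | cons x t ih =>
    simp only [List.length_cons, List.countP_cons, List.count_cons, ih]
    rcases lt_trichotomy x v with h | h | h <;> simp [h, not_lt_of_gt, ne_of_gt, ne_of_lt] <;> omega

theorem count_split (a : List Int) (i : Nat) (h : i < a.length) :
    a.count (a.getD i 0) = (a.take i).count (a.getD i 0) + 1 + (a.drop (i+1)).count (a.getD i 0) := by
  have hg : a.getD i 0 = a[i] := by simp [List.getD_eq_getElem?_getD, List.getElem?_eq_getElem h]
  rw [hg]
  obtain ⟨v, hv⟩ : ∃ v, a[i] = v := ⟨_, rfl⟩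
  rw [hv]
  have h2 : a = a.take i ++ v :: a.drop (i+1) := by
    rw [← hv, ← List.drop_eq_getElem_cons h, List.take_append_drop]
  conv_lhs => rw [h2]
  simp [List.count_append, List.count_cons]
  omega

theorem countP_getD_range (a : List Int) (p : Int → Bool) :
    (List.range a.length).countP (fun j => p (a.getD j 0)) = a.countP p := by
  conv_rhs => rw [← map_getD_range a]
  rw [List.countP_map]
  rfl

theorem countP_eq_lt (a : List Int) (v : Int) (i : Nat) (h : i < a.length) :
    (List.range a.length).countP (fun j => decide (v = a.getD j 0 ∧ ((j : Int) < (i : Int))))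
      = (a.take i).count v := by
  rw [show a.length = i + (a.length - i) by omega, List.range_add, List.countP_append]
  have h1 : (List.range i).countP (fun j => decide (v = a.getD j 0 ∧ ((j : Int) < (i : Int))))
      = (a.take i).count v := by
    rw [List.count_eq_countP, ← map_getD_range_take a i h.le, List.countP_map]
    apply List.countP_congr
    intro j hj
    have hji : ((j : Int)) < ((i : Int)) := by exact_mod_cast List.mem_range.mp hj
    simp only [Function.comp, decide_eq_true_iff, beq_iff_eq]
    constructor
    · rintro ⟨h1, _⟩; exact h1.symm
    · intro h1; exact ⟨h1.symm, hji⟩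
  have h2 : ((List.range (a.length - i)).map (fun x => i + x)).countP
      (fun j => decide (v = a.getD j 0 ∧ ((j : Int) < (i : Int)))) = 0 := by
    rw [List.countP_map, List.countP_eq_zero]
    intro t _
    simp only [Function.comp, decide_eq_true_iff, not_and]
    intro _
    push_cast
    omega
  rw [h1, h2]
  omega

theorem countP_eq_gt (a : List Int) (v : Int) (i : Nat) (h : i < a.length) :
    (List.range a.length).countP (fun j => decide (v = a.getD j 0 ∧ ((i : Int) < (j : Int))))
      = (a.drop (i+1)).count v := by
  rw [show a.length = (i+1) + (a.length - (i+1)) by omega, List.range_add, List.countP_append]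
  have h1 : (List.range (i+1)).countP (fun j => decide (v = a.getD j 0 ∧ ((i : Int) < (j : Int)))) = 0 := by
    rw [List.countP_eq_zero]
    intro j hj
    have hj' : j < i + 1 := List.mem_range.mp hj
    simp only [decide_eq_true_iff, not_and]
    intro _
    push_cast
    omega
  have h2 : ((List.range (a.length - (i+1))).map (fun x => (i+1) + x)).countP
      (fun j => decide (v = a.getD j 0 ∧ ((i : Int) < (j : Int)))) = (a.drop (i+1)).count v := by
    rw [List.countP_map, List.count_eq_countP, ← map_getD_range_drop a i, List.countP_map]
    apply List.countP_congr
    intro t _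
    have hlt : ((i : Int)) < (((i+1)+t : Nat) : Int) := by push_cast; omega
    simp only [Function.comp, decide_eq_true_iff, beq_iff_eq]
    constructor
    · rintro ⟨h1, _⟩; exact h1.symm
    · intro h1; exact ⟨h1.symm, hlt⟩
  rw [h1, h2]
  omega

-- the inner loop's two list lengths, in counting terms
theorem inner_len (a : List Int) (i : Nat) (hi : i < a.length) :
    (partsInner a i).1.length
        = a.countP (fun x => decide (x < a.getD i 0)) + (a.take i).count (a.getD i 0)
    ∧ (partsInner a i).2.length
        = a.countP (fun x => decide (a.getD i 0 < x)) + (a.drop (i+1)).count (a.getD i 0) := by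
  rw [partsInner, PySem.List.pyRange_zero_natCast, List.foldl_map]
  simp only [PySem.List.pyGetD_natCast, gt_iff_lt]
  rw [PySem.List.foldl_prod_mk
      (f := fun ac (j : Nat) =>
        if a.getD i 0 = a.getD j 0 ∧ ((j : Int) < (i : Int)) then
          (if a.getD j 0 < a.getD i 0 then ac ++ [a.getD j 0] else ac) ++ [a.getD j 0]
        else (if a.getD j 0 < a.getD i 0 then ac ++ [a.getD j 0] else ac))
      (g := fun ac (j : Nat) =>
        if a.getD i 0 = a.getD j 0 ∧ ((i : Int) < (j : Int)) then
          (if a.getD i 0 < a.getD j 0 then ac ++ [a.getD j 0] else ac) ++ [a.getD j 0]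
        else (if a.getD i 0 < a.getD j 0 then ac ++ [a.getD j 0] else ac))]
  constructor
  · rw [len_foldl_if_if (p := fun j : Nat => a.getD j 0 < a.getD i 0)
        (q := fun j : Nat => a.getD i 0 = a.getD j 0 ∧ ((j : Int) < (i : Int)))
        (f := fun j => a.getD j 0) (g := fun j => a.getD j 0)]
    rw [countP_getD_range a (fun x => decide (x < a.getD i 0)), countP_eq_lt a (a.getD i 0) i hi]
    simp
  · rw [len_foldl_if_if (p := fun j : Nat => a.getD i 0 < a.getD j 0)
        (q := fun j : Nat => a.getD i 0 = a.getD j 0 ∧ ((i : Int) < (j : Int)))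
        (f := fun j => a.getD j 0) (g := fun j => a.getD j 0)]
    rw [countP_getD_range a (fun x => decide (a.getD i 0 < x)), countP_eq_gt a (a.getD i 0) i hi]
    simp

-- the Nat-length condition of A is the Int condition goodB
theorem cond_iff (a : List Int) (i : Nat) (hi : i < a.length) :
    ((partsInner a i).1.length = (partsInner a i).2.length) ↔ goodB a i = true := by
  obtain ⟨h1, h2⟩ := inner_len a i hi
  rw [h1, h2, goodB, decide_eq_true_iff]
  have h3 := length_three_way a (a.getD i 0)
  have h4 := count_split a i hi
  constructor <;> intro h <;> [push_cast; skip] <;> omega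

theorem partsLoop_cons (a : List Int) (i : Int) (rest : List Int) :
    partsLoop a (i :: rest)
      = if (partsInner a i).1.length = (partsInner a i).2.length
        then some (PySem.List.pyGetD a i 0) else partsLoop a rest := rfl

-- A's loop over in-range indices is a find? over those indices
theorem partsLoop_eq (a : List Int) (is : List Nat) (hb : ∀ i ∈ is, i < a.length) :
    partsLoop a (is.map (Nat.cast : Nat → Int)) = (is.find? (goodB a)).map (fun i => a.getD i 0) := by
  induction is with
  | nil => simp [partsLoop]
  | cons i t ih =>
    have hi : i < a.length := hb i (by simp)
    have hcond := cond_iff a i hi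
    rw [List.map_cons, partsLoop_cons, List.find?_cons]
    by_cases hg : goodB a i = true
    · simp [hg, hcond.mpr hg, PySem.List.pyGetD_natCast]
    · have hne : ¬ (partsInner a ((i : Nat) : Int)).1.length = (partsInner a ((i : Nat) : Int)).2.length := by
        intro hc; exact hg (hcond.mp hc)
      simp [hg, hne, ih (fun j hj => hb j (by simp [hj]))]

theorem parts_eq_specFind (a : List Int) : parts a = specFind a := by
  rw [parts, PySem.List.pyRange_zero_natCast, specFind]
  exact partsLoop_eq a (List.range a.length) (by simp)

-- ===== B side =====

-- untouched keys of the less-building fold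
theorem lessFold_untouched (counts : PySem.Dict Int Int) (v : Int) :
    ∀ (ks : List Int) (d : PySem.Dict Int Int) (acc : Int), v ∉ ks →
    ((ks.foldl (fun (p : PySem.Dict Int Int × Int) k => (p.1.insert k p.2, p.2 + counts.getD k 0))
        (d, acc)).1).getD v 0 = d.getD v 0 := by
  intro ks
  induction ks with
  | nil => simp
  | cons k t ih =>
    intro d acc hv
    simp only [List.foldl_cons]
    rw [ih _ _ (by simp_all), PySem.Dict.getD_insert]
    simp_all

-- value of less[v]: the counts of all strictly smaller keys, in fold order
theorem lessFold_get (counts : PySem.Dict Int Int) (v : Int) :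
    ∀ (ks : List Int) (d : PySem.Dict Int Int) (acc : Int),
    ks.Pairwise (· < ·) → v ∈ ks →
    ((ks.foldl (fun (p : PySem.Dict Int Int × Int) k => (p.1.insert k p.2, p.2 + counts.getD k 0))
        (d, acc)).1).getD v 0
      = acc + ((ks.filter (fun k => decide (k < v))).map (fun k => counts.getD k 0)).sum := by
  intro ks
  induction ks with
  | nil => simp
  | cons k t ih =>
    intro d acc hp hv
    have hkt : ∀ u ∈ t, k < u := (List.pairwise_cons.mp hp).1
    simp only [List.foldl_cons]
    rcases List.mem_cons.mp hv with rfl | hvt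
    · have hnt : v ∉ t := fun h => lt_irrefl v (hkt v h)
      rw [lessFold_untouched counts v t _ _ hnt, PySem.Dict.getD_insert]
      have : t.filter (fun k => decide (k < v)) = [] := by
        rw [List.filter_eq_nil_iff]; intro u hu
        simp [not_lt_of_gt (hkt u hu)]
      simp [this, not_lt_of_gt, lt_irrefl]
    · have hkv : k < v := hkt v hvt
      rw [ih _ _ (List.pairwise_cons.mp hp).2 hvt]
      simp [hkv]
      ring

-- Nodup keys covering a list: summing counts over the small keys IS countP
theorem sum_count_filter (p : Int → Bool) :
    ∀ (a keys : List Int), keys.Nodup → (∀ x ∈ a, p x = true → x ∈ keys) →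
    ((keys.filter p).map (fun k => (a.count k : Int))).sum = (a.countP p : Int) := by
  intro a
  induction a with
  | nil => simp
  | cons x t ih =>
    intro keys hnd hmem
    have hsplit : ∀ k : Int, ((x :: t).count k : Int) = (t.count k : Int) + (if k = x then 1 else 0) := by
      intro k
      rcases eq_or_ne k x with h | h
      · subst h; simp [List.count_cons]
      · simp [List.count_cons, h, h.symm]
    have : ((keys.filter p).map (fun k => ((x :: t).count k : Int))).sum
        = ((keys.filter p).map (fun k => (t.count k : Int))).sum
          + ((keys.filter p).map (fun k => if k = x then (1:Int) else 0)).sum := by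
      rw [← List.sum_map_add]; simp only [hsplit]
    rw [this, ih keys hnd (fun y hy hp => hmem y (by simp [hy]) hp)]
    have hone : ((keys.filter p).map (fun k => if k = x then (1:Int) else 0)).sum
        = ((keys.filter p).count x : Int) := by
      rw [List.count_eq_countP, ← PySem.List.sum_map_ite_one_zero (fun k => k == x) (keys.filter p)]
      apply congrArg
      apply List.map_congr_left
      intro k _
      by_cases h : k = x <;> simp [h]
    rw [hone]
    by_cases hpx : p x = true
    · have hx : x ∈ keys.filter p := List.mem_filter.mpr ⟨hmem x (by simp) hpx, hpx⟩
      have h1 : (keys.filter p).count x = 1 :=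
        List.count_eq_one_of_mem (hnd.filter p) hx
      rw [h1]
      simp [List.countP_cons, hpx]
    · have hx : x ∉ keys.filter p := fun h => hpx (List.mem_filter.mp h).2
      simp [List.countP_cons, hpx, List.count_eq_zero_of_not_mem hx]

-- less.getD v 0 = countP (< v) for every v in the array
theorem less_getD (a : List Int) (v : Int) (hv : v ∈ a) :
    (((PySem.List.sorted (PySem.Dict.counter a).keys (fun x => x) false).foldl
        (fun (p : PySem.Dict Int Int × Int) k => (p.1.insert k p.2, p.2 + (PySem.Dict.counter a).getD k 0))
        (PySem.Dict.empty, 0)).1).getD v 0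
      = (a.countP (fun x => decide (x < v)) : Int) := by
  rw [PySem.Dict.keys_counter]
  have hperm := PySem.List.sorted_perm (PySem.Set.ofList a) (fun x => x) false
  have hnd : (PySem.List.sorted (PySem.Set.ofList a) (fun x => x) false).Nodup :=
    hperm.nodup_iff.mpr (PySem.Set.nodup_ofList a)
  have hle := PySem.List.sorted_pairwise (PySem.Set.ofList a) (fun x => x)
  have hlt : (PySem.List.sorted (PySem.Set.ofList a) (fun x => x) false).Pairwise (· < ·) :=
    (List.pairwise_and_iff.mpr ⟨hle, hnd⟩).imp (fun h => lt_of_le_of_ne h.1 h.2)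
  have hmemk : v ∈ PySem.List.sorted (PySem.Set.ofList a) (fun x => x) false :=
    hperm.mem_iff.mpr ((PySem.Set.mem_ofList a v).mpr hv)
  rw [lessFold_get (PySem.Dict.counter a) v _ _ _ hlt hmemk, zero_add]
  simp only [PySem.Dict.getD_counter]
  exact sum_count_filter (fun k => decide (k < v)) a _ hnd
    (fun x hx _ => hperm.mem_iff.mpr ((PySem.Set.mem_ofList a x).mpr hx))

-- B's scan, suffix by suffix
theorem altScan_eq (a : List Int) (less : PySem.Dict Int Int)
    (hless : ∀ v ∈ a, less.getD v 0 = (a.countP (fun x => decide (x < v)) : Int)) :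
    ∀ (m k : Nat) (seen : PySem.Dict Int Int), k + m = a.length →
    (∀ u, seen.getD u 0 = ((a.take k).count u : Int)) →
    altScan (a.length : Int) less seen (a.drop k)
      = ((List.range' k m).find? (goodB a)).map (fun i => a.getD i 0) := by
  intro m
  induction m with
  | zero =>
    intro k seen hk hs
    have hnil : a.drop k = [] := List.drop_eq_nil_of_le (by omega)
    simp [hnil, altScan]
  | succ m ih =>
    intro k seen hk hs
    have hklt : k < a.length := by omega
    rw [List.drop_eq_getElem_cons hklt, List.range'_succ]
    have hget : a.getD k 0 = a[k] := by simp [List.getD_eq_getElem?_getD, List.getElem?_eq_getElem hklt]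
    have hmem : a[k] ∈ a := List.getElem_mem hklt
    simp only [altScan, List.find?_cons]
    have hcond : (2 * (less.getD a[k] 0 + seen.getD a[k] 0) = (a.length : Int) - 1) ↔ goodB a k = true := by
      rw [hless a[k] hmem, hs, goodB, decide_eq_true_iff, hget]
    by_cases hg : goodB a k = true
    · simp [hg, hcond.mpr hg, hget, List.getElem?_eq_getElem hklt]
    · have hne : ¬ (2 * (less.getD a[k] 0 + seen.getD a[k] 0) = (a.length : Int) - 1) :=
        fun h => hg (hcond.mp h)
      rw [if_neg hne]
      simp only [hg, Bool.false_eq_true, if_false]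
      apply ih (k+1) _ (by omega)
      intro u
      have hcnt : (a.take (k+1)).count u = (a.take k).count u + if u = a[k] then 1 else 0 := by
        rw [List.take_add_one, List.getElem?_eq_getElem hklt, Option.toList_some, List.count_append]
        rcases eq_or_ne u a[k] with h | h
        · subst h; simp [List.count_cons]
        · simp [List.count_cons, h, Ne.symm h]
      rw [PySem.Dict.getD_insert, hcnt]
      by_cases hu : u = a[k]
      · rw [if_pos hu, if_pos hu, hu, hs a[k]]; push_cast; ring
      · rw [if_neg hu, if_neg hu, hs u]; simp

theorem parts_alt_eq_specFind (a : List Int) : parts_alt a = specFind a := by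
  rw [parts_alt]
  simp only [PySem.Dict.foldl_insert_getD_add_one_eq_counter]
  have h0 : ∀ u : Int, (PySem.Dict.empty : PySem.Dict Int Int).getD u 0 = ((a.take 0).count u : Int) := by
    simp
  have := altScan_eq a _ (fun v hv => less_getD a v hv) a.length 0 PySem.Dict.empty (by omega) h0
  simp only [List.drop_zero] at this
  rw [this, specFind, List.range_eq_range']

-- ===== VERDICT (by name: the statement is the Claim_ definition above) =====
theorem parts_spec : Claim_equal_parts := by
  intro a _
  unfold Spec_parts
  rw [parts_eq_specFind, parts_alt_eq_specFind]
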